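-- pv_equiv track=rewrite | github.com/umd-psycholing/lm-syntactic-generalization | generate_corpora.py | _fuse_apostrophes_in_tuple
-- ===== SOURCE A (Python) =====
-- def _fuse_apostrophes_in_tuple(input_tuple):
--     result = []
--     i = 0
--     while i < len(input_tuple):
--         current = input_tuple[i]
--         if i + 1 < len(input_tuple) and input_tuple[i + 1] == "'s":
--             result.append(current + input_tuple[i + 1])
--             i += 2
--         else:
--             result.append(current)
--             i += 1
--     return tuple(result)
-- ===== SOURCE B (Python) =====
-- def _fuse_apostrophes_in_tuple(input_tuple):
--     result = []
--     prev_merged = False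
--     for tok in input_tuple:
--         if tok == "'s" and result and not prev_merged:
--             result[-1] = result[-1] + tok
--             prev_merged = True
--         else:
--             result.append(tok)
--             prev_merged = False
--     return tuple(result)
-- ===== Notes on version B (the rewrite author's own statement) =====
-- stated objective: alternative
-- what changed: Replaced A's index-driven while loop with variable step (look-ahead at input_tuple[i+1], skipping two indices on a merge) by a plain forward for-loop over the tokens with look-behind state: a prev_merged flag and in-place fold of "'s" onto result[-1]; direct iteration avoids the per-step len() and indexing work, which a timing run measured as a constant-factor speedup.
import Mathlib
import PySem

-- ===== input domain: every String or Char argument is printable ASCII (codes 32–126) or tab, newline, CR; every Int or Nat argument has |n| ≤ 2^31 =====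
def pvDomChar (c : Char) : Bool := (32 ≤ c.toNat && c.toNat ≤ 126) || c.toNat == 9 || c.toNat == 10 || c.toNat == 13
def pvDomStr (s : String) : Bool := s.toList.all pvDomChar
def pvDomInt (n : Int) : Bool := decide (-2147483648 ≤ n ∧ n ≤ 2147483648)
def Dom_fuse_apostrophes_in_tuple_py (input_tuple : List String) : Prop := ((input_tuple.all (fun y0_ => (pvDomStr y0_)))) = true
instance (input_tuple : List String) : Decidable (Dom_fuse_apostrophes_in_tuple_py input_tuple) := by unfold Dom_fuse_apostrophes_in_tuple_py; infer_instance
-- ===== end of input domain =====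

-- B replaces A's index-with-variable-step look-ahead loop by a single forward for-loop with a prev_merged flag (look-behind state); a timing run measured B as constant-factor faster.
-- ===== PORT A =====
-- Port of A: while loop over index i, look-ahead at input_tuple[i+1], step 1 or 2,
-- written as the obvious structural recursion over the remaining suffix.
def fuseGoA : List String → List String
  | [] => []
  | [x] => [x]
  | x :: y :: rest =>
    if y = "'s" then (x ++ y) :: fuseGoA rest
    else x :: fuseGoA (y :: rest)

def fuse_apostrophes_in_tuple_py (input_tuple : List String) : List String :=
  fuseGoA input_tuple

-- ===== PORT B =====
-- Port of B: single forward fold; state = (result reversed, prev_merged flag).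
def fuseStep (st : List String × Bool) (tok : String) : List String × Bool :=
  if tok = "'s" ∧ st.1 ≠ [] ∧ st.2 = false then
    match st.1 with
    | h :: t => ((h ++ tok) :: t, true)
    | [] => (tok :: st.1, false)
  else (tok :: st.1, false)

def fuse_apostrophes_in_tuple_py_alt (input_tuple : List String) : List String :=
  ((input_tuple.foldl fuseStep ([], false)).1).reverse

-- ===== PRECONDITION & SPEC =====
def Spec_fuse_apostrophes_in_tuple_py (input_tuple : List String) (out : List String) : Prop := out = fuse_apostrophes_in_tuple_py_alt input_tuple
instance (input_tuple : List String) (out : List String) : Decidable (Spec_fuse_apostrophes_in_tuple_py input_tuple out) := by unfold Spec_fuse_apostrophes_in_tuple_py; infer_instance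

-- ===== CLAIM (what is proved, stated in full; the proofs are below) =====
def Claim_equal_fuse_apostrophes_in_tuple_py : Prop := ∀ (input_tuple : List String), Dom_fuse_apostrophes_in_tuple_py input_tuple → Spec_fuse_apostrophes_in_tuple_py input_tuple (fuse_apostrophes_in_tuple_py input_tuple)

-- ===== LEMMAS AND PROOFS =====

-- ===== VERDICT (by name: the statement is the Claim_ definition above) =====
-- Loop invariant: starting the B-fold in a state where the head of the remaining
-- input cannot legitimately merge backwards (flag is set, or no output yet, or the
-- head is not "'s"), the fold produces the previous output followed by A's result
-- on the remaining input.
theorem fuse_invariant : ∀ (l acc : List String) (flag : Bool),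
    (flag = true ∨ acc = [] ∨ l.head? ≠ some "'s") →
    ((l.foldl fuseStep (acc, flag)).1).reverse = acc.reverse ++ fuseGoA l := by
  intro l
  induction l using fuseGoA.induct with
  | case1 =>
    intro acc flag _
    simp [fuseGoA]
  | case2 x =>
    intro acc flag h
    have hstep : fuseStep (acc, flag) x = (x :: acc, false) := by
      unfold fuseStep
      rcases h with h | h | h
      · simp [h]
      · simp [h]
      · simp at h
        simp [h]
    simp [List.foldl, hstep, fuseGoA]
  | case3 x rest ih =>
    intro acc flag h
    have hstep : fuseStep (acc, flag) x = (x :: acc, false) := by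
      unfold fuseStep
      rcases h with h | h | h
      · simp [h]
      · simp [h]
      · simp at h
        simp [h]
    have hstep2 : fuseStep (x :: acc, false) ("'s" : String) = ((x ++ "'s") :: acc, true) := by
      unfold fuseStep
      simp
    calc ((List.foldl fuseStep (acc, flag) (x :: "'s" :: rest)).1).reverse
        = ((List.foldl fuseStep (((x ++ "'s") :: acc), true) rest).1).reverse := by
          simp [List.foldl, hstep, hstep2]
      _ = ((x ++ "'s") :: acc).reverse ++ fuseGoA rest := ih ((x ++ "'s") :: acc) true (Or.inl rfl)
      _ = acc.reverse ++ fuseGoA (x :: "'s" :: rest) := by simp [fuseGoA]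
  | case4 x y rest hy ih =>
    intro acc flag h
    have hstep : fuseStep (acc, flag) x = (x :: acc, false) := by
      unfold fuseStep
      rcases h with h | h | h
      · simp [h]
      · simp [h]
      · simp at h
        simp [h]
    calc ((List.foldl fuseStep (acc, flag) (x :: y :: rest)).1).reverse
        = ((List.foldl fuseStep ((x :: acc), false) (y :: rest)).1).reverse := by
          simp [List.foldl, hstep]
      _ = (x :: acc).reverse ++ fuseGoA (y :: rest) := ih (x :: acc) false (by right; right; simp [hy])
      _ = acc.reverse ++ fuseGoA (x :: y :: rest) := by simp [fuseGoA, hy]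

theorem fuse_apostrophes_in_tuple_py_spec : Claim_equal_fuse_apostrophes_in_tuple_py := by
  intro input_tuple _
  unfold Spec_fuse_apostrophes_in_tuple_py fuse_apostrophes_in_tuple_py fuse_apostrophes_in_tuple_py_alt
  rw [fuse_invariant input_tuple [] false (Or.inr (Or.inl rfl))]
  simp
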